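-- pv_equiv track=rewrite | github.com/AryanP281/Logistic-Regression-Model | test2.py | get_data_classes
-- ===== SOURCE A (Python) =====
-- def get_data_classes(inputs, outputs) :
--     classes = [[[], []], [[], []]]
--     for i in range(0, len(outputs)) :
--         if(outputs[i] == 0) :
--             classes[0][0].append(inputs[i][0])
--             classes[0][1].append(inputs[i][1])
--         else :
--             classes[1][0].append(inputs[i][0])
--             classes[1][1].append(inputs[i][1])
--
--     return classes
-- ===== SOURCE B (Python) =====
-- def get_data_classes(inputs, outputs):
--     # Phase 1: partition whole points into two groups by label.
--     groups = [[], []]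
--     for i in range(len(outputs)):
--         groups[0 if outputs[i] == 0 else 1].append(inputs[i])
--     # Phase 2: extract the two coordinate columns from each group.
--     return [[[p[0] for p in g], [p[1] for p in g]] for g in groups]
-- ===== Notes on version B (the rewrite author's own statement) =====
-- stated objective: alternative
-- what changed: Replaces A's single pass that appends coordinates into four nested lists by a two-phase decomposition: first partition whole points into two groups by label, then extract the coordinate columns from each group.
import Mathlib
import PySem

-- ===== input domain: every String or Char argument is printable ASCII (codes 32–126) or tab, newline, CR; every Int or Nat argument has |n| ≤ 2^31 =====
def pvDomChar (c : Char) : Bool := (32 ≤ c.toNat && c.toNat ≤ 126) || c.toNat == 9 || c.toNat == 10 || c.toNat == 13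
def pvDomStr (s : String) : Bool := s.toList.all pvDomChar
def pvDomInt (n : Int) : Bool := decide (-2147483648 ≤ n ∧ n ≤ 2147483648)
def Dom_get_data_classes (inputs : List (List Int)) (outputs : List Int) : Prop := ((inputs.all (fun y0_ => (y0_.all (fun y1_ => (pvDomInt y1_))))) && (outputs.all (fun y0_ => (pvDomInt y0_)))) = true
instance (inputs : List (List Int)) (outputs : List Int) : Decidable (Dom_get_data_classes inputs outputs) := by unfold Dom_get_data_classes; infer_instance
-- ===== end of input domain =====

-- B replaces A's one-pass four-list accumulation by a two-phase partition-then-column-extraction; same cost (objective: alternative).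
-- Equivalence is about the return value; neither function mutates its arguments.

-- ===== PORT A =====
-- single pass over range(len(outputs)), appending each coordinate into the four nested lists
def get_data_classes (inputs : List (List Int)) (outputs : List Int) : List (List (List Int)) :=
  let st := (PySem.List.pyRange 0 (outputs.length : Int) 1).foldl
    (fun (st : List Int × List Int × List Int × List Int) i =>
      let (c00, c01, c10, c11) := st
      let row := ((PySem.List.pyGet? inputs i).getD [])     -- inputs[i]; Pre_ guarantees in range
      let x0 := ((PySem.List.pyGet? row 0).getD 0)          -- inputs[i][0]
      let x1 := ((PySem.List.pyGet? row 1).getD 0)          -- inputs[i][1]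
      if ((PySem.List.pyGet? outputs i).getD 0) = 0 then
        (c00 ++ [x0], c01 ++ [x1], c10, c11)
      else
        (c00, c01, c10 ++ [x0], c11 ++ [x1]))
    ([], [], [], [])
  [[st.1, st.2.1], [st.2.2.1, st.2.2.2]]

-- ===== PORT B =====
-- phase 2: the two coordinate columns of a group of points
def pvColumns (g : List (List Int)) : List (List Int) :=
  [g.map (fun p => (PySem.List.pyGet? p 0).getD 0), g.map (fun p => (PySem.List.pyGet? p 1).getD 0)]

def get_data_classes_alt (inputs : List (List Int)) (outputs : List Int) : List (List (List Int)) :=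
  let groups := (PySem.List.pyRange 0 (outputs.length : Int) 1).foldl
    (fun (g : List (List Int) × List (List Int)) i =>
      if ((PySem.List.pyGet? outputs i).getD 0) = 0 then
        (g.1 ++ [(PySem.List.pyGet? inputs i).getD []], g.2)
      else
        (g.1, g.2 ++ [(PySem.List.pyGet? inputs i).getD []]))
    ([], [])
  [pvColumns groups.1, pvColumns groups.2]

-- ===== PRECONDITION & SPEC =====
-- Pre_ excludes exactly the inputs on which A raises IndexError: an index i < len(outputs)
-- with inputs[i] missing or shorter than 2.
def Pre_get_data_classes (inputs : List (List Int)) (outputs : List Int) : Prop :=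
  outputs.length ≤ inputs.length ∧ (inputs.take outputs.length).all (fun r => 2 ≤ r.length) = true
instance (inputs : List (List Int)) (outputs : List Int) : Decidable (Pre_get_data_classes inputs outputs) := by unfold Pre_get_data_classes; infer_instance
def pvWitness_get_data_classes : List (List Int) × List Int := ([[1, 2], [3, 4], [5, 6]], [0, 1, 0])
def Spec_get_data_classes (inputs : List (List Int)) (outputs : List Int) (out : List (List (List Int))) : Prop := out = get_data_classes_alt inputs outputs
instance (inputs : List (List Int)) (outputs : List Int) (out : List (List (List Int))) : Decidable (Spec_get_data_classes inputs outputs out) := by unfold Spec_get_data_classes; infer_instance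

-- ===== CLAIM (what is proved, stated in full; the proofs are below) =====
def Claim_equal_get_data_classes : Prop := ∀ (inputs : List (List Int)) (outputs : List Int), Dom_get_data_classes inputs outputs → Pre_get_data_classes inputs outputs → Spec_get_data_classes inputs outputs (get_data_classes inputs outputs)

-- ===== LEMMAS AND PROOFS =====

-- A's fold state is the image of B's fold state under column extraction (any index list, any accumulators).
theorem pv_fold_rel (inputs : List (List Int)) (outputs : List Int) (l : List Int)
    (g0 g1 : List (List Int)) :
    l.foldl
      (fun (st : List Int × List Int × List Int × List Int) i =>
        let (c00, c01, c10, c11) := st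
        let row := ((PySem.List.pyGet? inputs i).getD [])
        let x0 := ((PySem.List.pyGet? row 0).getD 0)
        let x1 := ((PySem.List.pyGet? row 1).getD 0)
        if ((PySem.List.pyGet? outputs i).getD 0) = 0 then
          (c00 ++ [x0], c01 ++ [x1], c10, c11)
        else
          (c00, c01, c10 ++ [x0], c11 ++ [x1]))
      (g0.map (fun p => (PySem.List.pyGet? p 0).getD 0),
       g0.map (fun p => (PySem.List.pyGet? p 1).getD 0),
       g1.map (fun p => (PySem.List.pyGet? p 0).getD 0),
       g1.map (fun p => (PySem.List.pyGet? p 1).getD 0)) =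
    (let g := l.foldl
        (fun (g : List (List Int) × List (List Int)) i =>
          if ((PySem.List.pyGet? outputs i).getD 0) = 0 then
            (g.1 ++ [(PySem.List.pyGet? inputs i).getD []], g.2)
          else
            (g.1, g.2 ++ [(PySem.List.pyGet? inputs i).getD []]))
        (g0, g1)
     (g.1.map (fun p => (PySem.List.pyGet? p 0).getD 0),
      g.1.map (fun p => (PySem.List.pyGet? p 1).getD 0),
      g.2.map (fun p => (PySem.List.pyGet? p 0).getD 0),
      g.2.map (fun p => (PySem.List.pyGet? p 1).getD 0))) := by
  induction l generalizing g0 g1 with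
  | nil => rfl
  | cons i t ih =>
    simp only [List.foldl_cons]
    by_cases h : ((PySem.List.pyGet? outputs i).getD 0) = 0 <;>
      simp only [h, if_pos, if_neg, not_false_iff] <;>
      · rw [← ih]
        simp [List.map_append]

-- ===== VERDICT (by name: the statement is the Claim_ definition above) =====
theorem get_data_classes_spec : Claim_equal_get_data_classes := by
  intro inputs outputs _ _
  unfold Spec_get_data_classes get_data_classes get_data_classes_alt pvColumns
  have := pv_fold_rel inputs outputs (PySem.List.pyRange 0 (outputs.length : Int) 1) [] []
  simp only [List.map_nil] at this
  simp only [this]
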